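-- pv_equiv track=rewrite | github.com/iannil/one-data-studio | tests/integration/test_asset_management.py | _infer_data_level
-- ===== SOURCE A (Python) =====
-- def _infer_data_level(columns, db_session):
--     level_priority = {
--         "restricted": 4,
--         "confidential": 3,
--         "internal": 2,
--         "public": 1,
--     }
--     max_level = "public"
--     max_priority = 0
--     for col in columns:
--         sensitivity_level = col.get("sensitivity_level")
--         if sensitivity_level and sensitivity_level in level_priority:
--             if level_priority[sensitivity_level] > max_priority:
--                 max_priority = level_priority[sensitivity_level]
--                 max_level = sensitivity_level
--     return max_level
-- ===== SOURCE B (Python) =====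
-- def _infer_data_level(columns, db_session):
--     present = {col.get("sensitivity_level") for col in columns}
--     for level in ("restricted", "confidential", "internal", "public"):
--         if level in present:
--             return level
--     return "public"
-- ===== Notes on version B (the rewrite author's own statement) =====
-- stated objective: simpler
-- what changed: A scans the columns maintaining a running (max_level, max_priority) pair against a priority dict; B collects the column sensitivity values into one set and walks the fixed priority ladder from highest to lowest, returning the first level present ('public' as the fallback).
import Mathlib
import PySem

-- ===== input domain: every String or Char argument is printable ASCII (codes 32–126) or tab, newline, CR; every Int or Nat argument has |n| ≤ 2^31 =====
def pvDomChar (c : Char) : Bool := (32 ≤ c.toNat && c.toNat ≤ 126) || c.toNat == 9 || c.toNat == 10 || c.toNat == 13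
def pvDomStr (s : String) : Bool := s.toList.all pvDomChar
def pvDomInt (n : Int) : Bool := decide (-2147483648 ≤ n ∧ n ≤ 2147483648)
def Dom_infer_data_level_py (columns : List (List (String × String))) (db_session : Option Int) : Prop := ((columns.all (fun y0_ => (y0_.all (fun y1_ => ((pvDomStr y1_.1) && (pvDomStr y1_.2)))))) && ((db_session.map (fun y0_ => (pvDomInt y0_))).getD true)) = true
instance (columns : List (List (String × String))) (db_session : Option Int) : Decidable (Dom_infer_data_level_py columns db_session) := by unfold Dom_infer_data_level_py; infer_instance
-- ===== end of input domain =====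

-- B replaces A's running-max scan over the columns by one membership set probed
-- down the fixed priority ladder (objective: simpler; same O(n) cost).

-- ===== PORT A =====
-- the literal level_priority dict of A
def pvLevelPriority : PySem.Dict String Int :=
  PySem.Dict.mk [("restricted", 4), ("confidential", 3), ("internal", 2), ("public", 1)]

-- one iteration of A's for-loop over columns (state = (max_level, max_priority))
def pvStepA (acc : String × Int) (col : List (String × String)) : String × Int :=
  match (PySem.Dict.mk col).get? "sensitivity_level" with
  | none => acc
  | some s =>
    if s ≠ "" ∧ pvLevelPriority.contains s = true then
      match pvLevelPriority.get? s with
      | none => acc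
      | some p => if p > acc.2 then (s, p) else acc
    else acc

def infer_data_level_py (columns : List (List (String × String))) (_db_session : Option Int) : String :=
  (columns.foldl pvStepA ("public", 0)).1

-- ===== PORT B =====
-- B's walk down the priority ladder, probing the membership set
def pvProbe (present : PySem.Set (Option String)) : List String → String
  | [] => "public"
  | l :: rest => if PySem.Set.contains present (some l) then l else pvProbe present rest

def infer_data_level_py_alt (columns : List (List (String × String))) (_db_session : Option Int) : String :=
  let present : PySem.Set (Option String) :=
    PySem.Set.ofList (columns.map (fun col => (PySem.Dict.mk col).get? "sensitivity_level"))
  pvProbe present ["restricted", "confidential", "internal", "public"]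

-- ===== PRECONDITION & SPEC =====
def Spec_infer_data_level_py (columns : List (List (String × String))) (db_session : Option Int) (out : String) : Prop := out = infer_data_level_py_alt columns db_session
instance (columns : List (List (String × String))) (db_session : Option Int) (out : String) : Decidable (Spec_infer_data_level_py columns db_session out) := by unfold Spec_infer_data_level_py; infer_instance

-- ===== CLAIM (what is proved, stated in full; the proofs are below) =====
def Claim_equal_infer_data_level_py : Prop := ∀ (columns : List (List (String × String))) (db_session : Option Int), Dom_infer_data_level_py columns db_session → Spec_infer_data_level_py columns db_session (infer_data_level_py columns db_session)

-- ===== LEMMAS AND PROOFS =====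

-- priority of one column's sensitivity value (0 = absent / not a level)
def pvPrio (g : Option String) : Int :=
  match g with
  | some "restricted" => 4
  | some "confidential" => 3
  | some "internal" => 2
  | some "public" => 1
  | _ => 0

-- the level name belonging to a priority (0 = the default)
def pvName (p : Int) : String :=
  if p = 4 then "restricted" else if p = 3 then "confidential"
  else if p = 2 then "internal" else "public"

def pvGet (col : List (String × String)) : Option String :=
  (PySem.Dict.mk col).get? "sensitivity_level"

-- max of the column priorities
def pvBest : List (List (String × String)) → Int
  | [] => 0
  | c :: r => max (pvPrio (pvGet c)) (pvBest r)

lemma pvPrio_cases (g : Option String) :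
    pvPrio g = 0 ∨ g = some "restricted" ∨ g = some "confidential" ∨
      g = some "internal" ∨ g = some "public" := by
  match g with
  | none => exact Or.inl rfl
  | some s =>
    by_cases h4 : s = "restricted"; · subst h4; simp
    by_cases h3 : s = "confidential"; · subst h3; simp
    by_cases h2 : s = "internal"; · subst h2; simp
    by_cases h1 : s = "public"; · subst h1; simp
    left; simp [pvPrio]; split <;> simp_all

lemma pvPrio_bounds (g : Option String) : 0 ≤ pvPrio g ∧ pvPrio g ≤ 4 := by
  rcases pvPrio_cases g with h | h | h | h | h
  · omega
  all_goals subst h; simp [pvPrio]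

lemma pvStepA_eq (acc : String × Int) (col : List (String × String)) (hp : 0 ≤ acc.2) :
    pvStepA acc col =
      if pvPrio (pvGet col) > acc.2 then (pvName (pvPrio (pvGet col)), pvPrio (pvGet col)) else acc := by
  rcases pvPrio_cases (pvGet col) with h | h | h | h | h
  · rw [h, if_neg (by omega)]
    unfold pvStepA
    unfold pvGet at h
    match hg : (PySem.Dict.mk col).get? "sensitivity_level" with
    | none => rfl
    | some s =>
      rw [hg] at h
      by_cases hc : pvLevelPriority.contains s = true
      · exfalso
        have hs : s = "restricted" ∨ s = "confidential" ∨ s = "internal" ∨ s = "public" := by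
          revert hc
          unfold pvLevelPriority
          simp
          tauto
        rcases hs with hs | hs | hs | hs <;> subst hs <;> simp [pvPrio] at h
      · simp [hc]
  · have h' := h; unfold pvGet at h'
    unfold pvStepA; rw [h', h]
    norm_num [pvPrio, pvName, show pvLevelPriority.get? "restricted" = some 4 from by decide,
      show pvLevelPriority.contains "restricted" = true from by decide,
      show ¬("restricted":String) = "" from by decide]
  · have h' := h; unfold pvGet at h'
    unfold pvStepA; rw [h', h]
    norm_num [pvPrio, pvName, show pvLevelPriority.get? "confidential" = some 3 from by decide,
      show pvLevelPriority.contains "confidential" = true from by decide,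
      show ¬("confidential":String) = "" from by decide]
  · have h' := h; unfold pvGet at h'
    unfold pvStepA; rw [h', h]
    norm_num [pvPrio, pvName, show pvLevelPriority.get? "internal" = some 2 from by decide,
      show pvLevelPriority.contains "internal" = true from by decide,
      show ¬("internal":String) = "" from by decide]
  · have h' := h; unfold pvGet at h'
    unfold pvStepA; rw [h', h]
    norm_num [pvPrio, pvName, show pvLevelPriority.get? "public" = some 1 from by decide,
      show pvLevelPriority.contains "public" = true from by decide,
      show ¬("public":String) = "" from by decide]

lemma pvBest_nonneg (cols : List (List (String × String))) : 0 ≤ pvBest cols := by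
  induction cols with
  | nil => simp [pvBest]
  | cons c r ih =>
    have := (pvPrio_bounds (pvGet c)).1
    simp only [pvBest]; omega

lemma pvBest_le4 (cols : List (List (String × String))) : pvBest cols ≤ 4 := by
  induction cols with
  | nil => simp [pvBest]
  | cons c r ih =>
    have := (pvPrio_bounds (pvGet c)).2
    simp only [pvBest]; omega

lemma pvFoldA (cols : List (List (String × String))) :
    ∀ (name : String) (p : Int), 0 ≤ p →
      cols.foldl pvStepA (name, p) =
        if pvBest cols > p then (pvName (pvBest cols), pvBest cols) else (name, p) := by
  induction cols with
  | nil =>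
    intro name p hp
    simp only [List.foldl, pvBest]
    rw [if_neg (by omega)]
  | cons c r ih =>
    intro name p hp
    obtain ⟨hc0, hc4⟩ := pvPrio_bounds (pvGet c)
    have hr0 := pvBest_nonneg r
    simp only [List.foldl, pvBest]
    rw [pvStepA_eq _ _ hp]
    by_cases hm : pvPrio (pvGet c) ≤ pvBest r
    · rw [max_eq_right hm]
      by_cases h1 : pvPrio (pvGet c) > p
      · rw [if_pos h1, ih _ _ hc0]
        by_cases h2 : pvBest r > pvPrio (pvGet c)
        · rw [if_pos h2, if_pos (by omega)]
        · have he : pvBest r = pvPrio (pvGet c) := by omega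
          rw [if_neg h2, if_pos (by omega), he]
      · rw [if_neg h1, ih _ _ hp]
    · rw [not_le] at hm
      rw [max_eq_left (le_of_lt hm)]
      by_cases h1 : pvPrio (pvGet c) > p
      · rw [if_pos h1, ih _ _ hc0, if_neg (by omega)]
      · rw [if_neg h1, ih _ _ hp, if_neg (by omega)]

lemma pvA_eq_name (cols : List (List (String × String))) (db : Option Int) :
    infer_data_level_py cols db = pvName (pvBest cols) := by
  unfold infer_data_level_py
  rw [pvFoldA cols "public" 0 le_rfl]
  by_cases h : pvBest cols > 0
  · rw [if_pos h]
  · rw [if_neg h]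
    have := pvBest_nonneg cols
    have h0 : pvBest cols = 0 := by omega
    simp [h0, pvName]

-- membership of a level in B's set ↔ a column carrying it
lemma pvMem_iff (cols : List (List (String × String))) (l : String) :
    (PySem.Set.contains
        (PySem.Set.ofList (cols.map (fun col => (PySem.Dict.mk col).get? "sensitivity_level")))
        (some l) = true) ↔ ∃ c ∈ cols, pvGet c = some l := by
  rw [PySem.Set.contains_iff, PySem.Set.mem_ofList, List.mem_map]
  simp only [pvGet]

lemma pvBest_ge (cols : List (List (String × String))) (k : Int) (hk : 0 < k) :
    k ≤ pvBest cols ↔ ∃ c ∈ cols, k ≤ pvPrio (pvGet c) := by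
  induction cols with
  | nil => simp [pvBest]; omega
  | cons c r ih =>
    simp only [pvBest, le_max_iff, List.mem_cons, ih]
    constructor
    · rintro (h | ⟨c', hc', h⟩)
      · exact ⟨c, Or.inl rfl, h⟩
      · exact ⟨c', Or.inr hc', h⟩
    · rintro ⟨c', hc' | hc', h⟩
      · subst hc'; exact Or.inl h
      · exact Or.inr ⟨c', hc', h⟩

lemma pvPrio_eq_iff (g : Option String) (k : Int) (hk : 1 ≤ k) (hk4 : k ≤ 4) :
    pvPrio g = k ↔ g = some (pvName k) := by
  constructor
  · intro h
    rcases pvPrio_cases g with h0 | h0 | h0 | h0 | h0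
    · omega
    all_goals
      subst h0; simp [pvPrio] at h; subst h; decide
  · intro h
    subst h
    interval_cases k <;> decide

lemma pvBest_eq_iff (cols : List (List (String × String))) (k : Int) (hk : 1 ≤ k) (hk4 : k ≤ 4) :
    pvBest cols = k ↔ ((∃ c ∈ cols, pvGet c = some (pvName k)) ∧ ¬ (k + 1 ≤ pvBest cols)) := by
  constructor
  · intro h
    refine ⟨?_, by omega⟩
    obtain ⟨c, hc, hle⟩ := (pvBest_ge cols k (by omega)).1 (by omega)
    have h4 := (pvPrio_bounds (pvGet c)).2
    have hub : pvPrio (pvGet c) ≤ k := by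
      by_contra hgt
      have := (pvBest_ge cols (pvPrio (pvGet c)) (by omega)).2 ⟨c, hc, le_rfl⟩
      omega
    exact ⟨c, hc, (pvPrio_eq_iff (pvGet c) k hk hk4).1 (by omega)⟩
  · rintro ⟨⟨c, hc, hg⟩, hub⟩
    have h1 : k ≤ pvBest cols := by
      refine (pvBest_ge cols k (by omega)).2 ⟨c, hc, ?_⟩
      rw [(pvPrio_eq_iff (pvGet c) k hk hk4).2 hg]
    omega

-- ===== VERDICT (by name: the statement is the Claim_ definition above) =====
theorem infer_data_level_py_spec : Claim_equal_infer_data_level_py := by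
  intro columns db_session _
  unfold Spec_infer_data_level_py
  rw [pvA_eq_name columns db_session]
  unfold infer_data_level_py_alt
  simp only [pvProbe]
  have hub := pvBest_nonneg columns
  have hlb := pvBest_le4 columns
  by_cases h4 : (PySem.Set.contains (PySem.Set.ofList (columns.map (fun col => (PySem.Dict.mk col).get? "sensitivity_level"))) (some "restricted")) = true
  · rw [if_pos h4]
    have : pvBest columns = 4 := by
      rw [pvBest_eq_iff columns 4 (by omega) (by omega)]
      exact ⟨(pvMem_iff columns "restricted").1 h4, by omega⟩
    simp [this, pvName]
  · rw [if_neg h4]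
    have hn4 : pvBest columns ≠ 4 := by
      intro h
      exact h4 ((pvMem_iff columns "restricted").2
        ((pvBest_eq_iff columns 4 (by omega) (by omega)).1 h).1)
    by_cases h3 : (PySem.Set.contains (PySem.Set.ofList (columns.map (fun col => (PySem.Dict.mk col).get? "sensitivity_level"))) (some "confidential")) = true
    · rw [if_pos h3]
      have : pvBest columns = 3 := by
        rw [pvBest_eq_iff columns 3 (by omega) (by omega)]
        exact ⟨(pvMem_iff columns "confidential").1 h3, by omega⟩
      simp [this, pvName]
    · rw [if_neg h3]
      have hn3 : pvBest columns ≠ 3 := by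
        intro h
        exact h3 ((pvMem_iff columns "confidential").2
          ((pvBest_eq_iff columns 3 (by omega) (by omega)).1 h).1)
      by_cases h2 : (PySem.Set.contains (PySem.Set.ofList (columns.map (fun col => (PySem.Dict.mk col).get? "sensitivity_level"))) (some "internal")) = true
      · rw [if_pos h2]
        have : pvBest columns = 2 := by
          rw [pvBest_eq_iff columns 2 (by omega) (by omega)]
          exact ⟨(pvMem_iff columns "internal").1 h2, by omega⟩
        simp [this, pvName]
      · rw [if_neg h2]
        have hn2 : pvBest columns ≠ 2 := by
          intro h
          exact h2 ((pvMem_iff columns "internal").2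
            ((pvBest_eq_iff columns 2 (by omega) (by omega)).1 h).1)
        by_cases h1 : (PySem.Set.contains (PySem.Set.ofList (columns.map (fun col => (PySem.Dict.mk col).get? "sensitivity_level"))) (some "public")) = true
        · rw [if_pos h1]
          have : pvBest columns = 1 := by
            rw [pvBest_eq_iff columns 1 (by omega) (by omega)]
            exact ⟨(pvMem_iff columns "public").1 h1, by omega⟩
          simp [this, pvName]
        · rw [if_neg h1]
          have hn1 : pvBest columns ≠ 1 := by
            intro h
            exact h1 ((pvMem_iff columns "public").2
              ((pvBest_eq_iff columns 1 (by omega) (by omega)).1 h).1)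
          have h0 : pvBest columns = 0 := by omega
          simp [h0, pvName]
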